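-- pv_equiv track=rewrite | github.com/HZRelaper2020/show_log | v2_draw_data_col.py | remove_attribute
-- ===== SOURCE A (Python) =====
-- def remove_attribute(pkg,attr):
--     spkg = pkg.split("\n")
--     newpkg = ""
--     jump = False
--     for line in spkg:
--         if line and line.strip():
--             sattr = line.split()[0].strip()
--             if sattr:
--                 if sattr.strip() == attr:
--                     jump = True
--                 elif sattr[0:1].isalpha():
--                     jump = False
--
--         if not jump:
--             newpkg += line+"\n"
--
--     return newpkg
-- ===== SOURCE B (Python) =====
-- def remove_attribute(pkg, attr):
--     # Pass 1: group lines into blocks; a line whose first whitespace-token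
--     # equals attr or starts with a letter opens a new block led by that token.
--     blocks = []
--     cur_tok = None
--     cur_lines = []
--     for line in pkg.split("\n"):
--         toks = line.split()
--         if toks and (toks[0] == attr or toks[0][:1].isalpha()):
--             blocks.append((cur_tok, cur_lines))
--             cur_tok, cur_lines = toks[0], [line]
--         else:
--             cur_lines.append(line)
--     blocks.append((cur_tok, cur_lines))
--     # Pass 2: keep every block whose leading token is not attr.
--     out = []
--     for tok, lines in blocks:
--         if tok != attr:
--             out.extend(lines)
--     return "".join(l + "\n" for l in out)
-- ===== Notes on version B (the rewrite author's own statement) =====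
-- stated objective: alternative
-- what changed: A's single-pass streaming jump-flag state machine is replaced by an explicit two-pass structure: first group the split lines into blocks keyed by their leading whitespace-token (a token equal to attr or starting with a letter opens a block), then filter out the blocks led by attr and join the kept lines.
import Mathlib
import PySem

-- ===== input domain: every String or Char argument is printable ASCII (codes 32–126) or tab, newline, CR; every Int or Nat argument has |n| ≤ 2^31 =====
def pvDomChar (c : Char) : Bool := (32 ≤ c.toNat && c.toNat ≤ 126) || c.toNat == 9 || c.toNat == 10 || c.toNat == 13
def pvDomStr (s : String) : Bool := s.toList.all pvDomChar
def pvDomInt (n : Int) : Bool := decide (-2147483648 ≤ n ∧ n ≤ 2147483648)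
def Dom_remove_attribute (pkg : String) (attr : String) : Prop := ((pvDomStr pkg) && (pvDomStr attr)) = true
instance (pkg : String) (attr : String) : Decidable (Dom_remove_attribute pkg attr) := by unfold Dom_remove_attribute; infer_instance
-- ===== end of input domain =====

-- B replaces A's streaming jump-flag state machine by a two-pass group-into-blocks-
-- then-filter decomposition (alternative structure, same cost).

-- ===== PORT A =====
-- one loop step of A: update the jump flag, then append line+"\n" when not jumping
def pvAstep (attr : String) (st : String × Bool) (line : String) : String × Bool :=
  let jump : Bool :=
    if line ≠ "" ∧ PySem.Str.strip line ≠ "" then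
      -- line.split()[0]: always in range here, since line.strip() is nonempty
      let sattr := PySem.Str.strip (PySem.List.pyGetD (PySem.Str.split₀ line) 0 "")
      if sattr ≠ "" then
        if PySem.Str.strip sattr = attr then true
        else if PySem.Str.strIsalpha (PySem.Str.slice sattr (some 0) (some 1)) then false
        else st.2
      else st.2
    else st.2
  if !jump then (st.1 ++ (line ++ "\n"), jump) else (st.1, jump)

def remove_attribute (pkg : String) (attr : String) : String :=
  let spkg := (PySem.Str.split? pkg "\n").getD []   -- pkg.split("\n"); sep ≠ "" so never none
  (spkg.foldl (pvAstep attr) ("", false)).1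

-- ===== PORT B =====
-- pass-1 step: a line whose first token equals attr or starts with a letter opens a
-- new block (the previous block is flushed); any other line joins the current block
def pvBgroup (attr : String)
    (st : List (Option String × List String) × Option String × List String)
    (line : String) : List (Option String × List String) × Option String × List String :=
  match PySem.Str.split₀ line with
  | [] => (st.1, st.2.1, st.2.2 ++ [line])
  | t :: _ =>
    if t = attr ∨ PySem.Str.strIsalpha (PySem.Str.slice t none (some 1)) then
      (st.1 ++ [(st.2.1, st.2.2)], some t, [line])
    else
      (st.1, st.2.1, st.2.2 ++ [line])

def remove_attribute_alt (pkg : String) (attr : String) : String :=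
  let st := ((PySem.Str.split? pkg "\n").getD []).foldl (pvBgroup attr) ([], none, [])
  let blocks := st.1 ++ [(st.2.1, st.2.2)]
  -- pass 2: keep every block whose leading token is not attr
  let out := blocks.foldl
    (fun (acc : List String) b => if b.1 ≠ some attr then acc ++ b.2 else acc) []
  PySem.Str.join "" (out.map (fun l => l ++ "\n"))

-- ===== PRECONDITION & SPEC =====
def Spec_remove_attribute (pkg : String) (attr : String) (out : String) : Prop := out = remove_attribute_alt pkg attr
instance (pkg : String) (attr : String) (out : String) : Decidable (Spec_remove_attribute pkg attr out) := by unfold Spec_remove_attribute; infer_instance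

-- ===== CLAIM (what is proved, stated in full; the proofs are below) =====
def Claim_equal_remove_attribute : Prop := ∀ (pkg : String) (attr : String), Dom_remove_attribute pkg attr → Spec_remove_attribute pkg attr (remove_attribute pkg attr)

-- ===== LEMMAS AND PROOFS =====

-- classification of a line, the branch shape both ports share:
-- some t = the line opens a block led by token t, none = it does not
def pvCls (attr line : String) : Option String :=
  match PySem.Str.split₀ line with
  | [] => none
  | t :: _ =>
    if t = attr ∨ PySem.Str.strIsalpha (PySem.Str.slice t none (some 1)) then some t else none

-- rendering of a list of kept lines
def pvRend (ls : List String) : String := PySem.Str.join "" (ls.map (fun l => l ++ "\n"))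

-- the lines B's second pass keeps out of a block list
def pvOut (attr : String) (bs : List (Option String × List String)) : List String :=
  bs.flatMap (fun b => if b.1 ≠ some attr then b.2 else [])

lemma pv_go_acc : ∀ (s cur : List Char) (acc : List (List Char)),
    PySem.Chars.split₀.go s cur acc = acc.reverse ++ PySem.Chars.split₀.go s cur [] := by
  intro s
  induction s with
  | nil => intro cur acc; simp [PySem.Chars.split₀.go]; split <;> simp
  | cons c rest ih =>
    intro cur acc
    simp only [PySem.Chars.split₀.go]
    split
    · split
      · exact ih [] acc
      · rw [ih [] (cur.reverse :: acc), ih [] [cur.reverse]]; simp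
    · exact ih (c :: cur) acc

lemma pv_go_skip (s : List Char) :
    PySem.Chars.split₀.go s [] [] = PySem.Chars.split₀.go (s.dropWhile PySem.Chars.isspace) [] [] := by
  induction s with
  | nil => rfl
  | cons c rest ih =>
    rw [List.dropWhile_cons]
    by_cases hc : PySem.Chars.isspace c = true
    · rw [if_pos hc]
      simp only [PySem.Chars.split₀.go, hc]
      simpa using ih
    · rw [if_neg hc]

lemma pv_go_head : ∀ (s cur : List Char), cur ≠ [] →
    (PySem.Chars.split₀.go s cur []).head? =
      some (cur.reverse ++ s.takeWhile (fun c => !PySem.Chars.isspace c)) := by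
  intro s
  induction s with
  | nil =>
    intro cur h
    simp [PySem.Chars.split₀.go, List.isEmpty_iff, h]
  | cons c rest ih =>
    intro cur h
    simp only [PySem.Chars.split₀.go]
    split
    · rename_i hsp
      rw [if_neg (by simp [List.isEmpty_iff, h])]
      rw [pv_go_acc]
      simp [List.takeWhile_cons, hsp]
    · rename_i hsp
      rw [ih (c :: cur) (by simp)]
      simp [List.takeWhile_cons, hsp]

lemma pv_split₀_eq_nil_iff (s : List Char) :
    PySem.Chars.split₀ s = [] ↔ s.dropWhile PySem.Chars.isspace = [] := by
  unfold PySem.Chars.split₀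
  rw [pv_go_skip]
  rcases h : s.dropWhile PySem.Chars.isspace with _ | ⟨c, r⟩
  · simp [PySem.Chars.split₀.go]
  · have hc : PySem.Chars.isspace c = false := by
      have := List.head_dropWhile_not PySem.Chars.isspace (by rw [h]; simp : s.dropWhile PySem.Chars.isspace ≠ [])
      simpa [h] using this
    simp only [PySem.Chars.split₀.go, hc]
    simp only [Bool.false_eq_true, if_false]
    constructor
    · intro hgo
      have := pv_go_head r [c] (by simp)
      rw [hgo] at this; simp at this
    · intro hh; simp at hh

lemma pv_split₀_head (s : List Char) (h : s.dropWhile PySem.Chars.isspace ≠ []) :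
    (PySem.Chars.split₀ s).head? =
      some ((s.dropWhile PySem.Chars.isspace).takeWhile (fun c => !PySem.Chars.isspace c)) := by
  unfold PySem.Chars.split₀
  rw [pv_go_skip]
  rcases hd : s.dropWhile PySem.Chars.isspace with _ | ⟨c, r⟩
  · exact absurd hd h
  · have hc : PySem.Chars.isspace c = false := by
      have := List.head_dropWhile_not PySem.Chars.isspace h
      simpa [hd] using this
    simp only [PySem.Chars.split₀.go, hc, Bool.false_eq_true, if_false]
    rw [pv_go_head r [c] (by simp)]
    simp [List.takeWhile_cons, hc]

lemma pv_dropWhile_all_false {α} (p : α → Bool) : ∀ (l : List α), (∀ c ∈ l, p c = false) →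
    l.dropWhile p = l := by
  intro l h
  induction l with
  | nil => rfl
  | cons c r ih => simp_all [List.dropWhile_cons]

lemma pv_noSpace_strip (t : List Char) (h : ∀ c ∈ t, PySem.Chars.isspace c = false) :
    PySem.Chars.strip t = t := by
  unfold PySem.Chars.strip PySem.Chars.lstrip PySem.Chars.rstrip
  rw [pv_dropWhile_all_false _ _ h]
  rw [pv_dropWhile_all_false _ _ (by intro c hc; exact h c (by simpa using hc))]
  simp

lemma pv_guard_false (line : String) (h : PySem.Str.split₀ line = []) :
    PySem.Str.strip line = "" := by
  have hb := PySem.Str.split₀_map_toList line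
  rw [h] at hb
  have hnil : PySem.Chars.split₀ line.toList = [] := by simpa using hb.symm
  have hd := (pv_split₀_eq_nil_iff line.toList).mp hnil
  rw [String.ext_iff, PySem.Str.toList_strip, String.toList_empty]
  unfold PySem.Chars.strip PySem.Chars.lstrip PySem.Chars.rstrip
  rw [hd]
  rfl

lemma pv_head_token (line t : String) (ts : List String)
    (h : PySem.Str.split₀ line = t :: ts) :
    (line ≠ "" ∧ PySem.Str.strip line ≠ "") ∧ PySem.Str.strip t = t ∧ t ≠ "" := by
  have hb := PySem.Str.split₀_map_toList line
  rw [h] at hb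
  have hcons : PySem.Chars.split₀ line.toList = t.toList :: ts.map String.toList := by
    simpa using hb.symm
  have hne : PySem.Chars.split₀ line.toList ≠ [] := by rw [hcons]; simp
  have hdw : line.toList.dropWhile PySem.Chars.isspace ≠ [] := by
    intro hd; exact hne ((pv_split₀_eq_nil_iff line.toList).mpr hd)
  have hhd := pv_split₀_head line.toList hdw
  rw [hcons] at hhd
  have ht : t.toList =
      (line.toList.dropWhile PySem.Chars.isspace).takeWhile (fun c => !PySem.Chars.isspace c) := by
    simpa using hhd
  rcases hdd : line.toList.dropWhile PySem.Chars.isspace with _ | ⟨c, r⟩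
  · exact absurd hdd hdw
  have hc : PySem.Chars.isspace c = false := by
    have := List.head_dropWhile_not PySem.Chars.isspace hdw
    simpa [hdd] using this
  refine ⟨⟨?_, ?_⟩, ?_, ?_⟩
  · -- line ≠ ""
    intro hl
    rw [hl] at hdd; simp at hdd
  · -- strip line ≠ ""
    rw [Ne, String.ext_iff, PySem.Str.toList_strip, String.toList_empty]
    unfold PySem.Chars.strip PySem.Chars.lstrip PySem.Chars.rstrip
    rw [hdd]
    intro hz
    rw [List.reverse_eq_nil_iff, List.dropWhile_eq_nil_iff] at hz
    have := hz c (by simp)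
    rw [hc] at this; simp at this
  · -- strip t = t
    rw [String.ext_iff, PySem.Str.toList_strip]
    apply pv_noSpace_strip
    intro d hd
    rw [ht] at hd
    have := List.mem_takeWhile_imp hd
    simpa using this
  · -- t ≠ ""
    rw [Ne, String.ext_iff, String.toList_empty, ht, hdd]
    simp [List.takeWhile_cons, hc]

lemma pv_slice01 (t : String) :
    PySem.Str.slice t (some 0) (some 1) = PySem.Str.slice t none (some 1) := by
  rw [String.ext_iff]
  simp [PySem.Str.toList_slice]

lemma pv_jump (attr line : String) (j : Bool) :
    (if line ≠ "" ∧ PySem.Str.strip line ≠ "" then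
      let sattr := PySem.Str.strip (PySem.List.pyGetD (PySem.Str.split₀ line) 0 "")
      if sattr ≠ "" then
        if PySem.Str.strip sattr = attr then true
        else if PySem.Str.strIsalpha (PySem.Str.slice sattr (some 0) (some 1)) then false
        else j
      else j
    else j) = (match pvCls attr line with | none => j | some t => decide (t = attr)) := by
  unfold pvCls
  rcases hs : PySem.Str.split₀ line with _ | ⟨t, ts⟩
  · simp only [hs]
    rw [if_neg (by simp [pv_guard_false line hs])]
  · obtain ⟨⟨hl, hsl⟩, hst, htne⟩ := pv_head_token line t ts hs
    simp only [hs, PySem.List.pyGetD_zero, List.getD_cons_zero]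
    rw [if_pos ⟨hl, hsl⟩, if_pos (by rw [hst]; exact htne)]
    simp only [hst]
    rw [pv_slice01]
    by_cases ha : t = attr
    · rw [if_pos ha, if_pos (Or.inl ha)]
      simp [ha]
    · rw [if_neg ha]
      by_cases hal : PySem.Str.strIsalpha (PySem.Str.slice t none (some 1)) = true
      · rw [if_pos hal, if_pos (Or.inr hal)]
        simp [ha]
      · rw [if_neg (by simpa using hal), if_neg (by tauto)]

lemma pv_step_eq (attr line : String) (st : String × Bool) :
    pvAstep attr st line =
      match pvCls attr line with
      | none => (if st.2 then st.1 else st.1 ++ (line ++ "\n"), st.2)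
      | some t => (if t = attr then st.1 else st.1 ++ (line ++ "\n"), decide (t = attr)) := by
  simp only [pvAstep]
  rw [pv_jump attr line st.2]
  rcases h : pvCls attr line with _ | t
  · cases hj : st.2 <;> simp
  · by_cases ha : t = attr <;> simp [ha]

lemma pv_step_none (attr line : String) (st : String × Bool) (h : pvCls attr line = none) :
    pvAstep attr st line = (if st.2 then st.1 else st.1 ++ (line ++ "\n"), st.2) := by
  rw [pv_step_eq, h]

lemma pv_step_some (attr line t : String) (st : String × Bool) (h : pvCls attr line = some t) :
    pvAstep attr st line =
      (if t = attr then st.1 else st.1 ++ (line ++ "\n"), decide (t = attr)) := by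
  rw [pv_step_eq, h]

lemma pv_group_eq (attr line : String)
    (st : List (Option String × List String) × Option String × List String) :
    pvBgroup attr st line =
      match pvCls attr line with
      | some t => (st.1 ++ [(st.2.1, st.2.2)], some t, [line])
      | none => (st.1, st.2.1, st.2.2 ++ [line]) := by
  unfold pvBgroup pvCls
  rcases hs : PySem.Str.split₀ line with _ | ⟨t, ts⟩
  · simp only
  · simp only
    by_cases hc : t = attr ∨ PySem.Str.strIsalpha (PySem.Str.slice t none (some 1)) = true
    · rw [if_pos hc, if_pos hc]
    · rw [if_neg hc, if_neg hc]

lemma pv_intercalate_nil (xs : List (List Char)) : List.intercalate [] xs = xs.flatten := by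
  induction xs with
  | nil => rfl
  | cons x xs ih =>
    rcases xs with _ | ⟨y, ys⟩
    · simp [List.intercalate]
    · simp_all [List.intercalate]

lemma pv_rend_toList (ls : List String) :
    (pvRend ls).toList = (ls.map (fun l => l.toList ++ ['\n'])).flatten := by
  unfold pvRend
  rw [PySem.Str.toList_join]
  unfold PySem.Chars.join
  rw [show String.toList "" = [] from rfl, pv_intercalate_nil]
  congr 1
  rw [List.map_map]
  apply List.map_congr_left
  intro l _
  simp [String.toList_append]

lemma pv_rend_nil : pvRend [] = "" := by
  rw [String.ext_iff, pv_rend_toList]; rfl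

lemma pv_rend_append (xs ys : List String) : pvRend (xs ++ ys) = pvRend xs ++ pvRend ys := by
  rw [String.ext_iff, String.toList_append, pv_rend_toList, pv_rend_toList, pv_rend_toList]
  simp

lemma pv_rend_singleton (l : String) : pvRend [l] = l ++ "\n" := by
  rw [String.ext_iff, pv_rend_toList, String.toList_append]
  simp

lemma pv_afold_prefix (attr : String) : ∀ (lines : List String) (acc : String) (j : Bool),
    (lines.foldl (pvAstep attr) (acc, j)).1 = acc ++ (lines.foldl (pvAstep attr) ("", j)).1 := by
  intro lines
  induction lines with
  | nil => intro acc j; simp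
  | cons l ls ih =>
    intro acc j
    rcases h : pvCls attr l with _ | t
    · rw [List.foldl_cons, List.foldl_cons, pv_step_none attr l _ h, pv_step_none attr l _ h]
      dsimp only
      cases j
      · simp only [Bool.false_eq_true, if_false]
        rw [ih (acc ++ (l ++ "\n")) false, ih ("" ++ (l ++ "\n")) false,
          String.empty_append, String.append_assoc]
      · simp only [if_true]
        exact ih acc true
    · rw [List.foldl_cons, List.foldl_cons, pv_step_some attr l t _ h, pv_step_some attr l t _ h]
      dsimp only
      by_cases ha : t = attr
      · simp only [ha, if_pos, decide_true, if_true]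
        exact ih acc true
      · rw [if_neg ha, if_neg ha]
        rw [ih (acc ++ (l ++ "\n")) _, ih ("" ++ (l ++ "\n")) _,
          String.empty_append, String.append_assoc]

lemma pv_outfold (attr : String) (bs : List (Option String × List String))
    (acc : List String) :
    bs.foldl (fun acc b => if b.1 ≠ some attr then acc ++ b.2 else acc) acc =
      acc ++ pvOut attr bs := by
  rw [show (fun (acc : List String) (b : Option String × List String) =>
      if b.1 ≠ some attr then acc ++ b.2 else acc) =
      (fun acc b => acc ++ (if b.1 ≠ some attr then b.2 else [])) from ?_]
  · rw [PySem.List.foldl_append_eq_flatMap]; rfl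
  · funext a b; split <;> simp

lemma pv_bfold_prefix (attr : String) : ∀ (lines : List String)
    (bs : List (Option String × List String)) (tok : Option String) (cur : List String),
    lines.foldl (pvBgroup attr) (bs, tok, cur) =
      ((bs ++ (lines.foldl (pvBgroup attr) ([], tok, cur)).1,
        (lines.foldl (pvBgroup attr) ([], tok, cur)).2)) := by
  intro lines
  induction lines with
  | nil => intro bs tok cur; simp
  | cons l ls ih =>
    intro bs tok cur
    rcases h : pvCls attr l with _ | t
    · rw [List.foldl_cons, List.foldl_cons, pv_group_eq, pv_group_eq, h]
      dsimp only
      exact ih bs tok (cur ++ [l])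
    · rw [List.foldl_cons, List.foldl_cons, pv_group_eq, pv_group_eq, h]
      dsimp only
      rw [ih (bs ++ [(tok, cur)]), ih ([] ++ [(tok, cur)])]
      simp

lemma pv_out_cons (attr : String) (b : Option String × List String)
    (bs : List (Option String × List String)) :
    pvOut attr (b :: bs) = (if b.1 ≠ some attr then b.2 else []) ++ pvOut attr bs := by
  simp [pvOut]

lemma pv_main (attr : String) : ∀ (lines : List String) (tok : Option String) (cur : List String),
    pvRend (pvOut attr ((lines.foldl (pvBgroup attr) ([], tok, cur)).1 ++
        [((lines.foldl (pvBgroup attr) ([], tok, cur)).2.1,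
          (lines.foldl (pvBgroup attr) ([], tok, cur)).2.2)])) =
      pvRend (if tok = some attr then [] else cur) ++
        (lines.foldl (pvAstep attr) ("", decide (tok = some attr))).1 := by
  intro lines
  induction lines with
  | nil =>
    intro tok cur
    simp only [List.foldl_nil, List.nil_append]
    rw [pv_out_cons, pvOut, List.flatMap_nil, List.append_nil, String.append_empty]
    by_cases h : tok = some attr
    · rw [if_pos h, if_neg (by simp [h])]
    · rw [if_neg h, if_pos (by simp [h])]
  | cons l ls ih =>
    intro tok cur
    rcases h : pvCls attr l with _ | t
    · -- non-leader line: joins the current block / A's flag unchanged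
      rw [List.foldl_cons, List.foldl_cons, pv_group_eq, h]
      dsimp only
      rw [pv_step_none attr l _ h]
      dsimp only
      rw [ih tok (cur ++ [l])]
      by_cases htok : tok = some attr
      · have hd : (decide (tok = some attr)) = true := by simp [htok]
        rw [if_pos htok, if_pos htok, hd]
        simp only [if_pos, if_true]
      · have hd : (decide (tok = some attr)) = false := by simp [htok]
        rw [if_neg htok, if_neg htok, hd]
        simp only [Bool.false_eq_true, if_false]
        rw [pv_rend_append, pv_rend_singleton]
        rw [pv_afold_prefix attr ls ("" ++ (l ++ "\n")) false, String.empty_append,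
          String.append_assoc]
    · -- leader line: flushes the block / A recomputes the flag
      rw [List.foldl_cons, List.foldl_cons, pv_group_eq, h]
      dsimp only
      rw [pv_step_some attr l t _ h]
      dsimp only
      rw [pv_bfold_prefix attr ls ([] ++ [(tok, cur)]) (some t) [l]]
      dsimp only
      rw [List.nil_append, List.singleton_append, List.cons_append, pv_out_cons, pv_rend_append]
      rw [ih (some t) [l]]
      dsimp only
      simp only [Option.some.injEq]
      have hif : (if tok ≠ some attr then cur else []) = (if tok = some attr then [] else cur) := by
        by_cases htok : tok = some attr <;> simp [htok]
      rw [hif]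
      by_cases ha : t = attr
      · rw [if_pos ha, if_pos ha, pv_rend_nil, String.empty_append]
      · rw [if_neg ha, if_neg ha, pv_rend_singleton]
        have hd : (decide (t = attr)) = false := by simp [ha]
        rw [hd, pv_afold_prefix attr ls ("" ++ (l ++ "\n")) false, String.empty_append,
          String.append_assoc]

-- ===== VERDICT (by name: the statement is the Claim_ definition above) =====
theorem remove_attribute_spec : Claim_equal_remove_attribute := by
  intro pkg attr _
  unfold Spec_remove_attribute remove_attribute remove_attribute_alt
  dsimp only
  rw [pv_outfold attr _ [], List.nil_append]
  have h := pv_main attr ((PySem.Str.split? pkg "\n").getD []) none []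
  rw [show (decide ((none : Option String) = some attr)) = false from by simp, ite_self,
    pv_rend_nil, String.empty_append] at h
  unfold pvRend at h
  exact h.symm
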